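-- pv_equiv track=rewrite | github.com/energy-in-joles/Advent-of-Code-2020-Solutions | Day16/Day16.py | is_in_field_range
-- ===== SOURCE A (Python) =====
-- def is_in_field_range(nearby_field, field_ranges): #
--   for val in nearby_field:
--     inrange = False
--     for f_range in field_ranges:
--       if val >= f_range[0] and val <= f_range[1]:
--         inrange = True
--         break
--     if not inrange:
--       return False
--   return True
-- ===== SOURCE B (Python) =====
-- def is_in_field_range(nearby_field, field_ranges):
--     # Build a sorted, coalesced interval index once, then binary-search each value.
--     merged = []
--     cur = None
--     for lo, hi in sorted(field_ranges, key=lambda r: r[0]):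
--         if cur is None:
--             cur = (lo, hi)
--         elif lo <= cur[1] + 1:
--             if hi > cur[1]:
--                 cur = (cur[0], hi)
--         else:
--             merged.append(cur)
--             cur = (lo, hi)
--     if cur is not None:
--         merged.append(cur)
--     for val in nearby_field:
--         # rightmost interval whose start is <= val
--         lo, hi = 0, len(merged)
--         while lo < hi:
--             mid = (lo + hi) // 2
--             if merged[mid][0] <= val:
--                 lo = mid + 1
--             else:
--                 hi = mid
--         if lo == 0:
--             return False
--         s, e = merged[lo - 1]
--         if not (s <= val and val <= e):
--             return False
--     return True
-- ===== Notes on version B (the rewrite author's own statement) =====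
-- stated objective: alternative
-- what changed: A scans every raw range linearly for each value; B sorts the ranges once, coalesces them into disjoint ordered intervals, and locates each value's candidate interval with a binary search.
import Mathlib
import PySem

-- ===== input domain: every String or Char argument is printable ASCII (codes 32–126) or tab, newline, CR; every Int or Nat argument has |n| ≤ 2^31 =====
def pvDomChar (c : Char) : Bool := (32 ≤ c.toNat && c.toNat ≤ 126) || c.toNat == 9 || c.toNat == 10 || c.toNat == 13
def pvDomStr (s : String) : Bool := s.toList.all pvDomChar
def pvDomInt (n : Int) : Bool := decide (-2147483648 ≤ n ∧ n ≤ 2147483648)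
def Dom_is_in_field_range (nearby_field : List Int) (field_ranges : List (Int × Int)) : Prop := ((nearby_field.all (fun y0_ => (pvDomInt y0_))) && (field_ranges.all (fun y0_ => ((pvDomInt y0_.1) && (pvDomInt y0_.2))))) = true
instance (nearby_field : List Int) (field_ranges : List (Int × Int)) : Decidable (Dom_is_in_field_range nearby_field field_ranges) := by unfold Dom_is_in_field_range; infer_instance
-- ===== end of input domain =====

-- B replaces A's per-value linear scan of the raw ranges by a sort-and-coalesce interval
-- index built once and queried by binary search per value (objective: alternative).

-- ===== PORT A =====
-- inner 'for f_range in field_ranges' with early break once a containing range is found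
def aInner (val : Int) : List (Int × Int) → Bool
  | [] => false
  | r :: rest => if val ≥ r.1 ∧ val ≤ r.2 then true else aInner val rest

-- outer 'for val in nearby_field', returning False as soon as a value is in no range
def is_in_field_range (nearby_field : List Int) (field_ranges : List (Int × Int)) : Bool :=
  match nearby_field with
  | [] => true
  | v :: rest =>
    if aInner v field_ranges then is_in_field_range rest field_ranges else false

-- ===== PORT B =====
-- merge loop over the (already sorted) remaining ranges; (clo, chi) is Python's cur, acc is merged
def bMergeLoop (clo chi : Int) (rest : List (Int × Int)) (acc : List (Int × Int)) : List (Int × Int) :=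
  match rest with
  | [] => acc ++ [(clo, chi)]
  | (lo, hi) :: rs =>
    if lo ≤ chi + 1 then
      bMergeLoop clo (if hi > chi then hi else chi) rs acc
    else
      bMergeLoop lo hi rs (acc ++ [(clo, chi)])

-- 'while lo < hi' binary search for the rightmost interval start ≤ val; returns final lo
def bSearch (merged : List (Int × Int)) (val : Int) (lo hi : Int) : Int :=
  if h : lo < hi then
    let mid := PySem.Int.floordiv (lo + hi) 2
    match PySem.List.pyGet? merged mid with
    | some r => if r.1 ≤ val then bSearch merged val (mid + 1) hi else bSearch merged val lo mid
    | none => lo   -- unreachable: 0 ≤ lo ≤ mid < hi ≤ length along every call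
  else lo
termination_by (hi - lo).toNat
decreasing_by
  all_goals
    have h2 := PySem.Int.floordiv_two_mid_bounds (lo := lo) (hi := hi) (le_of_lt h)
    have h3 : PySem.Int.floordiv (lo + hi) 2 < hi := by
      rw [PySem.Int.floordiv_lt_iff_lt_mul (by omega)]; omega
    omega

-- 'for val in nearby_field' loop: binary search + containment test, early False
def bCheckLoop (merged : List (Int × Int)) : List Int → Bool
  | [] => true
  | val :: rest =>
    let l := bSearch merged val 0 (PySem.List.len merged)
    if l = 0 then false
    else
      match PySem.List.pyGet? merged (l - 1) with
      | some (s, e) => if ¬ (s ≤ val ∧ val ≤ e) then false else bCheckLoop merged rest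
      | none => false   -- unreachable: 0 < l ≤ length

def is_in_field_range_alt (nearby_field : List Int) (field_ranges : List (Int × Int)) : Bool :=
  let srt := PySem.List.sorted field_ranges (fun r => r.1) false
  let merged :=
    match srt with
    | [] => []                     -- cur stays None: merged = []
    | (lo, hi) :: rest => bMergeLoop lo hi rest []
  bCheckLoop merged nearby_field

-- ===== PRECONDITION & SPEC =====
def Spec_is_in_field_range (nearby_field : List Int) (field_ranges : List (Int × Int)) (out : Bool) : Prop := out = is_in_field_range_alt nearby_field field_ranges
instance (nearby_field : List Int) (field_ranges : List (Int × Int)) (out : Bool) : Decidable (Spec_is_in_field_range nearby_field field_ranges out) := by unfold Spec_is_in_field_range; infer_instance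

-- ===== CLAIM (what is proved, stated in full; the proofs are below) =====
def Claim_equal_is_in_field_range : Prop := ∀ (nearby_field : List Int) (field_ranges : List (Int × Int)), Dom_is_in_field_range nearby_field field_ranges → Spec_is_in_field_range nearby_field field_ranges (is_in_field_range nearby_field field_ranges)

-- ===== LEMMAS AND PROOFS =====

-- membership of v in the union of inclusive ranges
def memB (rs : List (Int × Int)) (v : Int) : Bool :=
  rs.any (fun r => decide (r.1 ≤ v ∧ v ≤ r.2))

theorem aInner_eq_memB (v : Int) (rs : List (Int × Int)) : aInner v rs = memB rs v := by
  induction rs with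
  | nil => rfl
  | cons r rest ih =>
    simp only [aInner, memB, List.any_cons] at *
    by_cases h : v ≥ r.1 ∧ v ≤ r.2 <;> simp [h, ih]

theorem portA_eq_all (nf : List Int) (fr : List (Int × Int)) :
    is_in_field_range nf fr = nf.all (fun v => memB fr v) := by
  induction nf with
  | nil => rfl
  | cons v rest ih =>
    simp only [is_in_field_range, List.all_cons, aInner_eq_memB]
    by_cases h : memB fr v <;> simp [h, ih]

-- proof-side recursive form of the merge loop
def mergeAux (clo chi : Int) : List (Int × Int) → List (Int × Int)
  | [] => [(clo, chi)]
  | (lo, hi) :: rs =>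
    if lo ≤ chi + 1 then mergeAux clo (if hi > chi then hi else chi) rs
    else (clo, chi) :: mergeAux lo hi rs

theorem bMergeLoop_eq (clo chi : Int) (rest acc : List (Int × Int)) :
    bMergeLoop clo chi rest acc = acc ++ mergeAux clo chi rest := by
  induction rest generalizing clo chi acc with
  | nil => rfl
  | cons p rs ih =>
    obtain ⟨lo, hi⟩ := p
    simp only [bMergeLoop, mergeAux]
    by_cases h : lo ≤ chi + 1 <;> simp [h, ih]

theorem all_ext {α : Type} (l : List α) (f g : α → Bool) (h : ∀ x ∈ l, f x = g x) :
    l.all f = l.all g := by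
  induction l with
  | nil => rfl
  | cons a t ih => simp_all [List.all_cons]

-- merging preserves the union
theorem memB_mergeAux (v clo chi : Int) (rest : List (Int × Int))
    (hs : rest.Pairwise (fun a b => a.1 ≤ b.1)) (hlo : ∀ r ∈ rest, clo ≤ r.1) :
    memB (mergeAux clo chi rest) v = (decide (clo ≤ v ∧ v ≤ chi) || memB rest v) := by
  induction rest generalizing clo chi with
  | nil => simp [mergeAux, memB]
  | cons p rs ih =>
    obtain ⟨lo, hi⟩ := p
    have hclo : clo ≤ lo := hlo (lo, hi) (by simp)
    rw [List.pairwise_cons] at hs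
    simp only [mergeAux]
    by_cases h : lo ≤ chi + 1
    · simp only [h, if_true]
      rw [ih clo _ hs.2 (fun r hr => hlo r (List.mem_cons_of_mem _ hr))]
      rw [Bool.eq_iff_iff]
      simp only [memB, List.any_cons, Bool.or_eq_true, decide_eq_true_eq]
      have hiff : (clo ≤ v ∧ v ≤ (if hi > chi then hi else chi)) ↔
          ((clo ≤ v ∧ v ≤ chi) ∨ (lo ≤ v ∧ v ≤ hi)) := by
        by_cases hh : hi > chi <;> simp only [hh, if_true, if_false] <;> omega
      rw [hiff]
      tauto
    · simp only [h, if_false]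
      rw [show memB ((clo, chi) :: mergeAux lo hi rs) v
            = (decide (clo ≤ v ∧ v ≤ chi) || memB (mergeAux lo hi rs) v) from rfl]
      rw [ih lo hi hs.2 hs.1]
      rw [show memB ((lo, hi) :: rs) v = (decide (lo ≤ v ∧ v ≤ hi) || memB rs v) from rfl]

-- elements produced by mergeAux have first component ≥ clo
theorem mergeAux_fst_ge (clo chi : Int) (rest : List (Int × Int))
    (hs : rest.Pairwise (fun a b => a.1 ≤ b.1)) (hlo : ∀ r ∈ rest, clo ≤ r.1) :
    ∀ x ∈ mergeAux clo chi rest, clo ≤ x.1 := by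
  induction rest generalizing clo chi with
  | nil => simp [mergeAux]
  | cons p rs ih =>
    obtain ⟨lo, hi⟩ := p
    have hclo : clo ≤ lo := hlo (lo, hi) (by simp)
    rw [List.pairwise_cons] at hs
    simp only [mergeAux]
    by_cases h : lo ≤ chi + 1
    · simp only [h, if_true]
      exact ih clo _ hs.2 (fun r hr => hlo r (List.mem_cons_of_mem _ hr))
    · simp only [h, if_false]
      intro x hx
      rcases List.mem_cons.mp hx with hx | hx
      · simp [hx]
      · exact le_trans hclo (ih lo hi hs.2 hs.1 x hx)

-- the merged list is pairwise ordered: starts nondecreasing, each end below every later start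
theorem mergeAux_pairwise (clo chi : Int) (rest : List (Int × Int))
    (hs : rest.Pairwise (fun a b => a.1 ≤ b.1)) (hlo : ∀ r ∈ rest, clo ≤ r.1) :
    (mergeAux clo chi rest).Pairwise (fun a b => a.1 ≤ b.1 ∧ a.2 < b.1) := by
  induction rest generalizing clo chi with
  | nil => simp [mergeAux]
  | cons p rs ih =>
    obtain ⟨lo, hi⟩ := p
    have hclo : clo ≤ lo := hlo (lo, hi) (by simp)
    rw [List.pairwise_cons] at hs
    simp only [mergeAux]
    by_cases h : lo ≤ chi + 1
    · simp only [h, if_true]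
      exact ih clo _ hs.2 (fun r hr => hlo r (List.mem_cons_of_mem _ hr))
    · simp only [h, if_false]
      rw [List.pairwise_cons]
      refine ⟨?_, ih lo hi hs.2 hs.1⟩
      intro x hx
      have h1 : lo ≤ x.1 := mergeAux_fst_ge lo hi rs hs.2 hs.1 x hx
      constructor <;> omega

-- bSearch invariant: below the result every start is ≤ val, at/above it every start is > val
theorem bSearch_spec (ms : List (Int × Int)) (val : Int)
    (hmono : ∀ (p q : Nat) (hp : p < ms.length) (hq : q < ms.length), p ≤ q → ms[p].1 ≤ ms[q].1) :
    ∀ (n : Nat) (lo hi : Int), (hi - lo).toNat = n →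
    0 ≤ lo → lo ≤ hi → hi ≤ (ms.length : Int) →
    (∀ (j : Nat) (hj : j < ms.length), (j : Int) < lo → ms[j].1 ≤ val) →
    (∀ (j : Nat) (hj : j < ms.length), hi ≤ (j : Int) → val < ms[j].1) →
    0 ≤ bSearch ms val lo hi ∧ bSearch ms val lo hi ≤ (ms.length : Int) ∧
      (∀ (j : Nat) (hj : j < ms.length), (j : Int) < bSearch ms val lo hi → ms[j].1 ≤ val) ∧
      (∀ (j : Nat) (hj : j < ms.length), bSearch ms val lo hi ≤ (j : Int) → val < ms[j].1) := by
  intro n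
  induction n using Nat.strong_induction_on with
  | _ n IH =>
    intro lo hi hn h0 hlh hhi hbelow habove
    rw [bSearch]
    by_cases h : lo < hi
    · simp only [h, dif_pos]
      have hmid := PySem.Int.floordiv_two_mid_bounds (lo := lo) (hi := hi) (le_of_lt h)
      set mid := PySem.Int.floordiv (lo + hi) 2 with hmiddef
      have hmidlt : mid < hi := by
        rw [hmiddef, PySem.Int.floordiv_lt_iff_lt_mul (by omega)]; omega
      have hmidrange : 0 ≤ mid ∧ mid < (ms.length : Int) := by omega
      have hget : PySem.List.pyGet? ms mid = some ms[mid.toNat] :=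
        PySem.List.pyGet?_eq_some_getElem ms hmidrange.1 hmidrange.2
      rw [hget]
      have hmlt : mid.toNat < ms.length := by omega
      by_cases hc : ms[mid.toNat].1 ≤ val
      · simp only [hc, if_pos]
        refine IH ((hi - (mid + 1)).toNat) (by omega) (mid + 1) hi (by rfl) (by omega)
          (by omega) hhi ?_ habove
        intro j hj hjlt
        have hjle : j ≤ mid.toNat := by omega
        exact le_trans (hmono j mid.toNat hj hmlt hjle) hc
      · simp only [hc]
        refine IH ((mid - lo).toNat) (by omega) lo mid (by rfl) h0 (by omega) (by omega)
          hbelow ?_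
        intro j hj hjge
        have hjle : mid.toNat ≤ j := by omega
        exact lt_of_lt_of_le (by omega) (hmono mid.toNat j hmlt hj hjle)
    · rw [dif_neg h]
      refine ⟨h0, by omega, fun j hj hjlt => hbelow j hj hjlt, fun j hj hjge => ?_⟩
      exact habove j hj (by omega)

-- the per-value check of B, as the proofs use it
def bCheckVal (ms : List (Int × Int)) (val : Int) : Bool :=
  let l := bSearch ms val 0 (PySem.List.len ms)
  if l = 0 then false
  else
    match PySem.List.pyGet? ms (l - 1) with
    | some (s, e) => decide (s ≤ val ∧ val ≤ e)
    | none => false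

theorem bCheckLoop_cons (ms : List (Int × Int)) (v : Int) (rest : List Int) :
    bCheckLoop ms (v :: rest) = (bCheckVal ms v && bCheckLoop ms rest) := by
  simp only [bCheckLoop, bCheckVal]
  by_cases h0 : bSearch ms v 0 (PySem.List.len ms) = 0
  · rw [if_pos h0, if_pos h0]
    exact (Bool.false_and _).symm
  · rw [if_neg h0, if_neg h0]
    cases hg : PySem.List.pyGet? ms (bSearch ms v 0 (PySem.List.len ms) - 1) with
    | none => exact (Bool.false_and _).symm
    | some p =>
      obtain ⟨s, e⟩ := p
      by_cases hc : s ≤ v ∧ v ≤ e <;> simp [hc]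

theorem bCheckVal_eq_memB (ms : List (Int × Int)) (v : Int)
    (hp : ms.Pairwise (fun a b => a.1 ≤ b.1 ∧ a.2 < b.1)) :
    bCheckVal ms v = memB ms v := by
  have hpg := List.pairwise_iff_getElem.mp hp
  have hmono : ∀ (p q : Nat) (hp' : p < ms.length) (hq : q < ms.length), p ≤ q →
      ms[p].1 ≤ ms[q].1 := by
    intro p q hp' hq hpq
    rcases Nat.lt_or_ge p q with h | h
    · exact (hpg p q hp' hq h).1
    · have : p = q := by omega
      subst this; exact le_refl _
  have hspec := bSearch_spec ms v hmono ((PySem.List.len ms : Int) - 0).toNat 0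
    (PySem.List.len ms) rfl (by omega) (by simp only [PySem.List.len_eq]; omega)
    (by simp only [PySem.List.len_eq]; exact le_refl _)
    (by intro j hj hjlt; omega)
    (by intro j hj hge; simp [PySem.List.len_eq] at hge; omega)
  set l := bSearch ms v 0 (PySem.List.len ms) with hl
  obtain ⟨hl0, hllen, hbel, habv⟩ := hspec
  simp only [bCheckVal, ← hl]
  by_cases hz : l = 0
  · simp only [hz, if_pos]
    rw [Bool.eq_iff_iff]
    simp only [memB, List.any_eq_true, Bool.false_eq_true, false_iff]
    rintro ⟨r, hr, hrv⟩
    obtain ⟨j, hj, rfl⟩ := List.mem_iff_getElem.mp hr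
    have := habv j hj (by omega)
    simp at hrv
    omega
  · simp only [hz]
    have hk : (l - 1).toNat < ms.length := by omega
    have hget : PySem.List.pyGet? ms (l - 1) = some ms[(l - 1).toNat] :=
      PySem.List.pyGet?_eq_some_getElem ms (by omega) (by omega)
    rw [hget]
    have hks : ms[(l - 1).toNat].1 ≤ v := hbel (l - 1).toNat hk (by omega)
    rw [Bool.eq_iff_iff]
    simp only [memB, List.any_eq_true, decide_eq_true_eq]
    constructor
    · intro hc
      exact ⟨ms[(l - 1).toNat], List.getElem_mem hk, by simpa using hc⟩
    · rintro ⟨r, hr, hrv⟩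
      obtain ⟨j, hj, rfl⟩ := List.mem_iff_getElem.mp hr
      rcases Nat.lt_trichotomy j (l - 1).toNat with hlt | heq | hgt
      · have := (hpg j (l - 1).toNat hj hk hlt).2
        omega
      · subst heq; simpa using hrv
      · have := habv j hj (by omega)
        omega

theorem bCheckLoop_eq_all (ms : List (Int × Int)) (nf : List Int)
    (hp : ms.Pairwise (fun a b => a.1 ≤ b.1 ∧ a.2 < b.1)) :
    bCheckLoop ms nf = nf.all (fun v => memB ms v) := by
  induction nf with
  | nil => rfl
  | cons v rest ih =>
    rw [bCheckLoop_cons, bCheckVal_eq_memB ms v hp, List.all_cons, ih]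

-- ===== VERDICT (by name: the statement is the Claim_ definition above) =====
theorem is_in_field_range_spec : Claim_equal_is_in_field_range := by
  intro nf fr _
  unfold Spec_is_in_field_range
  rw [portA_eq_all]
  unfold is_in_field_range_alt
  have hperm : (PySem.List.sorted fr (fun r => r.1) false).Perm fr :=
    PySem.List.sorted_perm fr (fun r => r.1) false
  have hsorted : (PySem.List.sorted fr (fun r => r.1) false).Pairwise
      (fun a b => a.1 ≤ b.1) := PySem.List.sorted_pairwise fr (fun r => r.1)
  cases hsrt : PySem.List.sorted fr (fun r => r.1) false with
  | nil =>
    have hfr : fr = [] := by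
      have := hsrt ▸ hperm
      exact this.symm.eq_nil
    subst hfr
    rw [bCheckLoop_eq_all [] nf (by simp)]
  | cons p rest =>
    obtain ⟨lo, hi⟩ := p
    rw [hsrt] at hperm hsorted
    rw [List.pairwise_cons] at hsorted
    simp only [bMergeLoop_eq, List.nil_append]
    rw [bCheckLoop_eq_all _ nf (mergeAux_pairwise lo hi rest hsorted.2 hsorted.1)]
    apply all_ext
    intro v _
    rw [memB_mergeAux v lo hi rest hsorted.2 hsorted.1]
    have : memB fr v = memB ((lo, hi) :: rest) v := by
      exact (List.Perm.any_eq hperm).symm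
    rw [this]
    simp [memB]
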